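-- pv_equiv track=rewrite | github.com/Rourrou/Combined-Attack-on-LWE-with-hints | proba.py | min_mode
-- ===== SOURCE A (Python) =====
-- def min_mode(a):
--     """
--     return the min value of mode of array(a)
--     """
--     sta = {}
--     for i in range(0, len(a)):
--         b = a[i]
--         sta[b] = sta.get(b, 0) + 1
--     maxnum = 0
--     for i in range(0, len(a)):
--         b = a[i]
--         if sta[b] > maxnum:
--             maxnum = sta[b]
--     mode = []
--     for i in range(0, len(a)):
--         b = a[i]
--         if sta[b] == maxnum:
--             mode.append(b)
--     abs_mode = []
--     for j in range(0, len(mode)):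
--         abs_mode.append(abs(mode[j]))
--     ind = abs_mode.index(max(abs_mode))
--     return mode[ind]
-- ===== SOURCE B (Python) =====
-- def min_mode(a):
--     """
--     return the min value of mode of array(a)
--     """
--     counts = {}
--     for x in a:
--         counts[x] = counts.get(x, 0) + 1
--     return max(a, key=lambda x: (counts[x], abs(x)))
-- ===== Notes on version B (the rewrite author's own statement) =====
-- stated objective: simpler
-- what changed: Replaced A's four separate passes (max-frequency scan, mode-list filter, abs-list build, argmax-by-index) with one frequency dictionary plus a single composite-key max(a, key=lambda x: (counts[x], abs(x))), which preserves A's first-in-array tie-break.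
import Mathlib
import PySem

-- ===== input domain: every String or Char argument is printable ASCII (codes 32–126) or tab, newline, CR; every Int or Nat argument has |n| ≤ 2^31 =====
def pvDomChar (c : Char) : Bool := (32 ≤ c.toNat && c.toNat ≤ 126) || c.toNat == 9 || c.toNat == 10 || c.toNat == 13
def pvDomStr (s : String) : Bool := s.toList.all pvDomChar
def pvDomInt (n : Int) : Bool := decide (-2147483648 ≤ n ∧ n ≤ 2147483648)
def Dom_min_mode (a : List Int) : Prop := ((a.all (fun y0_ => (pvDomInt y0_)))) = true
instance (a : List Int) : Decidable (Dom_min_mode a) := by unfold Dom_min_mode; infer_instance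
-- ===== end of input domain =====

-- B is a simpler decomposition: one counting dict, then a single composite-key argmax; equivalence proved for nonempty input (A raises ValueError on []).

-- ===== PORT A =====
def min_mode (a : List Int) : Int :=
  let sta := (PySem.List.pyRange 0 (PySem.List.len a) 1).foldl
      (fun d i => let b := PySem.List.pyGetD a i 0; d.insert b (d.getD b 0 + 1))
      (PySem.Dict.empty)
  let maxnum : Int := (PySem.List.pyRange 0 (PySem.List.len a) 1).foldl
      (fun m i => let b := PySem.List.pyGetD a i 0; if sta.getD b 0 > m then sta.getD b 0 else m) 0
  let mode : List Int := (PySem.List.pyRange 0 (PySem.List.len a) 1).foldl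
      (fun l i => let b := PySem.List.pyGetD a i 0; if sta.getD b 0 == maxnum then l ++ [b] else l) []
  let abs_mode : List Int := (PySem.List.pyRange 0 (PySem.List.len mode) 1).foldl
      (fun l j => l ++ [|PySem.List.pyGetD mode j 0|]) []
  match PySem.List.max? abs_mode (fun y => y) with
  | none => 0        -- Python raises ValueError here (a = []); excluded by Pre_
  | some mx =>
    match PySem.List.index? abs_mode mx with
    | none => 0      -- unreachable: mx ∈ abs_mode
    | some ind => (PySem.List.pyGet? mode (ind : Int)).getD 0

-- ===== PORT B =====
def min_mode_alt (a : List Int) : Int :=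
  let counts : PySem.Dict Int Int := a.foldl (fun d x => d.insert x (d.getD x 0 + 1)) (PySem.Dict.empty)
  (PySem.List.max2? a (fun x => counts.getD x 0) (fun x => |x|)).getD 0
  -- Python raises ValueError on a = [] (excluded by Pre_); .getD 0 covers only that branch

-- ===== PRECONDITION & SPEC =====
-- Pre_ excludes exactly the empty list, on which A (and B) raise ValueError from max().
def Pre_min_mode (a : List Int) : Prop := a ≠ []
instance (a : List Int) : Decidable (Pre_min_mode a) := by unfold Pre_min_mode; infer_instance
def pvWitness_min_mode : List Int := [1, -2, 2, -2, 2]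
def Spec_min_mode (a : List Int) (out : Int) : Prop := out = min_mode_alt a
instance (a : List Int) (out : Int) : Decidable (Spec_min_mode a out) := by unfold Spec_min_mode; infer_instance

-- ===== CLAIM (what is proved, stated in full; the proofs are below) =====
def Claim_equal_min_mode : Prop := ∀ (a : List Int), Dom_min_mode a → Pre_min_mode a → Spec_min_mode a (min_mode a)

-- ===== LEMMAS AND PROOFS =====

def mmStep (c k : Int → Int) (m x : Int) : Int :=
  if (decide (c m < c x) || !decide (c x < c m) && decide (k m < k x)) = true then x else m

theorem mm_max2?_eq_foldl (c k : Int → Int) (t : List Int) (b : Int) :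
    PySem.List.max2? (b :: t) c k = some (t.foldl (mmStep c k) b) := by
  show List.foldl _ (some b) t = _
  induction t generalizing b with
  | nil => rfl
  | cons x t ih =>
      simp only [List.foldl_cons, mmStep]
      split <;> exact ih _

theorem mm_fold_spec (c k : Int → Int) (t : List Int) (b : Int) :
    (t.foldl (mmStep c k) b = b ∨ t.foldl (mmStep c k) b ∈ t)
    ∧ (∀ x ∈ b :: t, c x < c (t.foldl (mmStep c k) b)
        ∨ (c x = c (t.foldl (mmStep c k) b) ∧ k x ≤ k (t.foldl (mmStep c k) b)))
    ∧ (b :: t).find? (fun x => decide (c x = c (t.foldl (mmStep c k) b))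
          && decide (k x = k (t.foldl (mmStep c k) b))) = some (t.foldl (mmStep c k) b) := by
  induction t generalizing b with
  | nil =>
      refine ⟨Or.inl rfl, ?_, ?_⟩
      · intro x hx; simp at hx; subst hx; simp only [List.foldl_nil]; right; exact ⟨trivial, le_refl _⟩
      · simp [List.find?]
  | cons x t ih =>
      by_cases hc : (decide (c b < c x) || !decide (c x < c b) && decide (k b < k x)) = true
      · have hbx : mmStep c k b x = x := by simp only [mmStep, hc, if_true]
        have hlex : c b < c x ∨ (c b = c x ∧ k b < k x) := by
          simp only [Bool.or_eq_true, Bool.and_eq_true, Bool.not_eq_true',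
            decide_eq_true_eq, decide_eq_false_iff_not] at hc
          omega
        simp only [List.foldl_cons, hbx]
        obtain ⟨ihm, ihub, ihfind⟩ := ih x
        have hxr := ihub x (by simp)
        refine ⟨?_, ?_, ?_⟩
        · rcases ihm with h | h
          · right; rw [h]; exact List.mem_cons_self
          · right; exact List.mem_cons_of_mem _ h
        · intro y hy
          rcases List.mem_cons.1 hy with h | hy'
          · subst h; omega
          · exact ihub y hy'
        · rw [List.find?_cons_of_neg (by
            simp only [Bool.and_eq_true, decide_eq_true_eq, not_and]
            intro h; omega)]
          exact ihfind
      · have hbx : mmStep c k b x = b := by simp [mmStep, hc]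
        have hc' : ¬(c b < c x) ∧ (c x < c b ∨ ¬(k b < k x)) := by
          simp only [Bool.or_eq_true, Bool.and_eq_true, Bool.not_eq_true',
            decide_eq_true_eq, decide_eq_false_iff_not, not_or, not_and] at hc
          tauto
        have hlexxb : c x < c b ∨ (c x ≤ c b ∧ k x ≤ k b) := by omega
        simp only [List.foldl_cons, hbx]
        obtain ⟨ihm, ihub, ihfind⟩ := ih b
        have hbr := ihub b (by simp)
        refine ⟨?_, ?_, ?_⟩
        · rcases ihm with h | h
          · left; exact h
          · right; exact List.mem_cons_of_mem _ h
        · intro y hy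
          rcases List.mem_cons.1 hy with h | hy'
          · subst h; exact hbr
          · rcases List.mem_cons.1 hy' with h | h
            · subst h; omega
            · exact ihub y (List.mem_cons_of_mem _ h)
        · by_cases hPb : (c b = c (t.foldl (mmStep c k) b) ∧ k b = k (t.foldl (mmStep c k) b))
          · have hfb : (b :: t).find? (fun y => decide (c y = c (t.foldl (mmStep c k) b))
                && decide (k y = k (t.foldl (mmStep c k) b))) = some b :=
              List.find?_cons_of_pos (by simp [hPb.1, hPb.2])
            have hrb : t.foldl (mmStep c k) b = b := by
              have := hfb ▸ ihfind; exact (Option.some_inj.1 this.symm)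
            rw [List.find?_cons_of_pos (by simp [hPb.1, hPb.2]), hrb]
          · have hblt : c b < c (t.foldl (mmStep c k) b)
                ∨ (c b = c (t.foldl (mmStep c k) b) ∧ k b < k (t.foldl (mmStep c k) b)) := by
              omega
            have hxne : ¬(c x = c (t.foldl (mmStep c k) b) ∧ k x = k (t.foldl (mmStep c k) b)) := by
              omega
            rw [List.find?_cons_of_neg (by simp only [Bool.and_eq_true, decide_eq_true_eq]; exact hPb),
                List.find?_cons_of_neg (by simp only [Bool.and_eq_true, decide_eq_true_eq]; exact hxne)]
            rw [List.find?_cons_of_neg (by simp only [Bool.and_eq_true, decide_eq_true_eq]; exact hPb)] at ihfind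
            exact ihfind

theorem mm_foldmax (c : Int → Int) (l : List Int) (init : Int) :
    init ≤ l.foldl (fun m b => if c b > m then c b else m) init
    ∧ (∀ x ∈ l, c x ≤ l.foldl (fun m b => if c b > m then c b else m) init)
    ∧ (l.foldl (fun m b => if c b > m then c b else m) init = init
        ∨ ∃ x ∈ l, c x = l.foldl (fun m b => if c b > m then c b else m) init) := by
  induction l generalizing init with
  | nil => exact ⟨le_refl _, by simp, Or.inl rfl⟩
  | cons a l ih =>
      simp only [List.foldl_cons]
      by_cases hca : c a > init
      · simp only [if_pos hca]
        obtain ⟨h1, h2, h3⟩ := ih (c a)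
        refine ⟨by omega, ?_, ?_⟩
        · intro x hx
          rcases List.mem_cons.1 hx with h | h
          · subst h; exact h1
          · exact h2 x h
        · rcases h3 with h | ⟨x, hx, hcx⟩
          · right; exact ⟨a, List.mem_cons_self, h.symm ▸ rfl⟩
          · right; exact ⟨x, List.mem_cons_of_mem _ hx, hcx⟩
      · simp only [if_neg hca]
        obtain ⟨h1, h2, h3⟩ := ih init
        refine ⟨h1, ?_, ?_⟩
        · intro x hx
          rcases List.mem_cons.1 hx with h | h
          · subst h; omega
          · exact h2 x h
        · rcases h3 with h | ⟨x, hx, hcx⟩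
          · left; exact h
          · right; exact ⟨x, List.mem_cons_of_mem _ hx, hcx⟩

theorem mm_find?_filter (p q : Int → Bool) (l : List Int) :
    (l.filter p).find? q = l.find? (fun x => p x && q x) := by
  induction l with
  | nil => rfl
  | cons a l ih =>
      by_cases hp : p a = true
      · by_cases hq : q a = true
        · simp [hp, List.find?_cons_of_pos, hq]
        · simp only [List.filter_cons, hp, if_true]
          rw [List.find?_cons_of_neg (by simp [hq]),
              List.find?_cons_of_neg (by simp [hq]), ih]
      · simp only [List.filter_cons, hp, Bool.false_eq_true, if_false]
        rw [ih, List.find?_cons_of_neg (by simp [hp])]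

theorem mm_find?_congr (p q : Int → Bool) (l : List Int) (h : ∀ x ∈ l, p x = q x) :
    l.find? p = l.find? q := by
  induction l with
  | nil => rfl
  | cons a l ih =>
      have ha := h a (by simp)
      by_cases hp : p a = true
      · rw [List.find?_cons_of_pos hp, List.find?_cons_of_pos (ha ▸ hp)]
      · rw [List.find?_cons_of_neg hp, List.find?_cons_of_neg (by rw [← ha]; exact hp),
            ih (fun x hx => h x (List.mem_cons_of_mem _ hx))]

theorem mm_find?_eq_getElem (l : List Int) (p : Int → Bool) (i : Nat) (hi : i < l.length)
    (hp : p l[i] = true) (hlt : ∀ j (hj : j < i), p (l[j]'(hj.trans hi)) = false) :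
    l.find? p = some l[i] := by
  induction l generalizing i with
  | nil => simp at hi
  | cons a l ih =>
      cases i with
      | zero => simpa using List.find?_cons_of_pos hp
      | succ i =>
          rw [List.find?_cons_of_neg (by simpa using hlt 0 (Nat.succ_pos i))]
          simpa using ih i (by simpa using hi) (by simpa using hp)
            (fun j hj => by simpa using hlt (j+1) (by omega))

theorem min_mode_agree (a : List Int) (hne : a ≠ []) : min_mode a = min_mode_alt a := by
  obtain ⟨hd, tl, rfl⟩ := List.exists_cons_of_ne_nil hne
  -- names
  have h1 : (PySem.List.pyRange 0 (PySem.List.len (hd :: tl)) 1).foldl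
      (fun d i => (d.insert (PySem.List.pyGetD (hd :: tl) i 0)
        (d.getD (PySem.List.pyGetD (hd :: tl) i 0) 0 + 1))) (PySem.Dict.empty : PySem.Dict Int Int)
      = (hd :: tl).foldl (fun d b => d.insert b (d.getD b 0 + 1)) PySem.Dict.empty :=
    PySem.List.foldl_pyRange_zero_pyGetD (hd :: tl) 0 (fun (d : PySem.Dict Int Int) b => d.insert b (d.getD b 0 + 1)) PySem.Dict.empty
  simp only [min_mode]
  rw [h1]
  set staF := List.foldl (fun (d : PySem.Dict Int Int) b => d.insert b (d.getD b 0 + 1)) PySem.Dict.empty (hd :: tl) with hsta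
  have h2 : (PySem.List.pyRange 0 (PySem.List.len (hd :: tl)) 1).foldl
      (fun m i => if staF.getD (PySem.List.pyGetD (hd :: tl) i 0) 0 > m
        then staF.getD (PySem.List.pyGetD (hd :: tl) i 0) 0 else m) (0 : Int)
      = (hd :: tl).foldl (fun m b => if staF.getD b 0 > m then staF.getD b 0 else m) 0 :=
    PySem.List.foldl_pyRange_zero_pyGetD (hd :: tl) 0
      (fun m b => if staF.getD b 0 > m then staF.getD b 0 else m) (0 : Int)
  rw [h2]
  set M := (hd :: tl).foldl (fun m b => if staF.getD b 0 > m then staF.getD b 0 else m) 0 with hM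
  have h3 : (PySem.List.pyRange 0 (PySem.List.len (hd :: tl)) 1).foldl
      (fun l i => if (staF.getD (PySem.List.pyGetD (hd :: tl) i 0) 0 == M) = true
        then l ++ [PySem.List.pyGetD (hd :: tl) i 0] else l) ([] : List Int)
      = (hd :: tl).foldl (fun l b => if (staF.getD b 0 == M) = true then l ++ [b] else l) [] :=
    PySem.List.foldl_pyRange_zero_pyGetD (hd :: tl) 0
      (fun l b => if (staF.getD b 0 == M) = true then l ++ [b] else l) ([] : List Int)
  rw [h3, PySem.List.foldl_append_if_eq_filter (fun b => staF.getD b 0 == M) (hd :: tl) [],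
      List.nil_append]
  set mode := (hd :: tl).filter (fun b => staF.getD b 0 == M) with hmode
  have h4 : (PySem.List.pyRange 0 (PySem.List.len mode) 1).foldl
      (fun l j => l ++ [|PySem.List.pyGetD mode j 0|]) ([] : List Int)
      = mode.foldl (fun l x => l ++ [|x|]) [] :=
    PySem.List.foldl_pyRange_zero_pyGetD mode 0 (fun l x => l ++ [|x|]) ([] : List Int)
  rw [h4, PySem.List.foldl_append_singleton_eq_map (fun x => |x|) mode [], List.nil_append]
  set absm := mode.map (fun x => |x|) with habsm
  -- counts are list counts
  have hcount : ∀ x : Int, staF.getD x 0 = (((hd :: tl).count x : Nat) : Int) := by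
    intro x
    rw [hsta, PySem.Dict.getD_foldl_insert_add_one]
    simp
  have hcpos : ∀ x ∈ hd :: tl, 1 ≤ staF.getD x 0 := by
    intro x hx
    rw [hcount x]
    exact_mod_cast List.count_pos_iff.2 hx
  -- M facts
  have hMub : ∀ x ∈ hd :: tl, staF.getD x 0 ≤ M :=
    (mm_foldmax (fun x => staF.getD x 0) (hd :: tl) 0).2.1
  have hMat : M = 0 ∨ ∃ x ∈ hd :: tl, staF.getD x 0 = M :=
    (mm_foldmax (fun x => staF.getD x 0) (hd :: tl) 0).2.2
  have hMattain : ∃ z ∈ hd :: tl, staF.getD z 0 = M := by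
    rcases hMat with h | h
    · exfalso
      have := hcpos hd List.mem_cons_self
      have := hMub hd List.mem_cons_self
      omega
    · exact h
  obtain ⟨z, hza, hzM⟩ := hMattain
  have hzmode : z ∈ mode := by
    rw [hmode]; exact List.mem_filter.2 ⟨hza, by simp [hzM]⟩
  have habsne : absm ≠ [] := by
    rw [habsm]
    simp only [ne_eq, List.map_eq_nil_iff]
    exact List.ne_nil_of_mem hzmode
  -- the max of absm
  rcases hmx : PySem.List.max? absm (fun y => y) with _ | mx
  · exact absurd ((PySem.List.max?_eq_none_iff absm _).1 hmx) habsne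
  have hmxmem : mx ∈ absm := PySem.List.max?_mem hmx
  have hmxub : ∀ y ∈ absm, y ≤ mx := PySem.List.max?_isMax hmx
  -- the index
  have hindS : (PySem.List.index? absm mx).isSome = true :=
    (PySem.List.index?_isSome_iff absm mx).2 hmxmem
  obtain ⟨ind, hind⟩ := Option.isSome_iff_exists.1 hindS
  simp only [hind]
  obtain ⟨hklt, hgetEq, hfirst⟩ := PySem.List.getElem_of_index?_eq_some hind
  have hlenm : absm.length = mode.length := by rw [habsm]; exact List.length_map ..
  have hindm : ind < mode.length := hlenm ▸ hklt
  rw [PySem.List.pyGet?_natCast, List.getElem?_eq_getElem hindm, Option.getD_some]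
  -- B side
  simp only [min_mode_alt]
  show mode[ind] = (PySem.List.max2? (hd :: tl) (fun x => staF.getD x 0) (fun x => |x|)).getD 0
  rw [mm_max2?_eq_foldl (fun x => staF.getD x 0) (fun x => |x|) tl hd, Option.getD_some]
  set r := tl.foldl (mmStep (fun x => staF.getD x 0) (fun x => |x|)) hd with hrdef
  obtain ⟨hmemr, hubr, hfindr⟩ :=
    mm_fold_spec (fun x => staF.getD x 0) (fun x => |x|) tl hd
  rw [← hrdef] at hmemr hubr hfindr
  have hra : r ∈ hd :: tl := by
    rcases hmemr with h | h
    · rw [h]; exact List.mem_cons_self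
    · exact List.mem_cons_of_mem _ h
  -- the element found by A
  obtain ⟨z', hz'⟩ : ∃ z', mode[ind] = z' := ⟨_, rfl⟩
  rw [hz']
  have hz'mem : z' ∈ mode := hz' ▸ List.getElem_mem hindm
  have hz'mf : z' ∈ List.filter (fun b => staF.getD b 0 == M) (hd :: tl) := by
    rw [← hmode]; exact hz'mem
  have hz'a : z' ∈ hd :: tl := (List.mem_filter.1 hz'mf).1
  have hz'M : staF.getD z' 0 = M := by
    have := (List.mem_filter.1 hz'mf).2; simpa using this
  have hz'abs : |z'| = mx := by
    have h2 : absm[ind]'hklt = |mode[ind]| := by simp [habsm]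
    rw [← hz', ← h2]
    exact hgetEq
  have hmodeub : ∀ x ∈ mode, |x| ≤ mx := by
    intro x hx
    exact hmxub |x| (habsm ▸ List.mem_map_of_mem hx)
  -- r has the maximal key
  have hlexz := hubr z' hz'a
  have hrM' : staF.getD r 0 ≤ M := hMub r hra
  have hrM : staF.getD r 0 = M ∧ mx ≤ |r| := by
    rcases hlexz with h | ⟨h1, h2⟩
    · exfalso; omega
    · constructor
      · omega
      · rw [← hz'abs]; exact h2
  have hrmode : r ∈ mode := by
    rw [hmode]; exact List.mem_filter.2 ⟨hra, by simp [hrM.1]⟩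
  have hrabs : |r| = mx := le_antisymm (hmodeub r hrmode) hrM.2
  -- find? chain
  have hp : ((fun x => |x| == mx) mode[ind]) = true := by
    simp only [hz']; simp [hz'abs]
  have hplt : ∀ j (hj : j < ind), ((fun x => |x| == mx) (mode[j]'(hj.trans hindm))) = false := by
    intro j hj
    have h1 : absm[j]'(hlenm ▸ hj.trans hindm) ≠ mx := hfirst j hj
    have h2 : absm[j]'(hlenm ▸ hj.trans hindm) = |mode[j]'(hj.trans hindm)| := by
      simp [habsm]
    simp only [beq_eq_false_iff_ne, ne_eq]
    rw [← h2]; exact h1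
  have hAfind : mode.find? (fun x => |x| == mx) = some z' := by
    rw [← hz']
    exact mm_find?_eq_getElem mode (fun x => |x| == mx) ind hindm hp hplt
  have hBfind : (hd :: tl).find? (fun x => (staF.getD x 0 == M) && (|x| == mx)) = some z' := by
    rw [← mm_find?_filter (fun b => staF.getD b 0 == M) (fun x => |x| == mx) (hd :: tl), ← hmode]
    exact hAfind
  have hfindr' : (hd :: tl).find?
      (fun x => decide (staF.getD x 0 = staF.getD r 0) && decide (|x| = |r|)) = some r := hfindr
  have hcong : (hd :: tl).find? (fun x => (staF.getD x 0 == M) && (|x| == mx))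
      = (hd :: tl).find? (fun x => decide (staF.getD x 0 = staF.getD r 0) && decide (|x| = |r|)) := by
    apply mm_find?_congr
    intro x hx
    rw [hrM.1, hrabs]
    rfl
  have hzr : some z' = some r := by rw [← hBfind, hcong, hfindr']
  exact Option.some_inj.1 hzr

-- ===== VERDICT (by name: the statement is the Claim_ definition above) =====
theorem min_mode_spec : Claim_equal_min_mode := by
  intro a _ hpre
  exact min_mode_agree a hpre
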